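-- pv_equiv track=rewrite | github.com/ManojKumarPatnaik/practice-alg | Solution/EqualSegments.py | solution
-- ===== SOURCE A (Python) =====
-- def solution(A):
--   """Finds the maximum number of non-intersecting segments of length 2
--   (two adjacent elements), such that segments have an equal sum.
--
--   Args:
--     A: A list of integers.
--
--   Returns:
--     The maximum number of non-intersecting segments of length 2 with equal sums.
--   """
--
--   # Get the length of the input array.
--   N = len(A)
--
--   # Initialize the maximum number of segments.
--   maxSegments = 1
--
--   # Iterate over the input array, starting from index 1.
--   for i in range(1, N):
--     # Calculate the sum of the current and previous elements.
--     equalSum = A[i - 1] + A[i]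
--
--     # Initialize the number of segments with the current sum.
--     currentSegments = 1
--
--     # Iterate over the remaining elements in the array.
--     j = i + 1
--     while j < N - 1:
--       # If the sum of the current and next elements is equal to the current sum,
--       # then increment the number of segments with the current sum.
--       if equalSum == A[j] + A[j + 1]:
--         currentSegments += 1
--         j += 2  # Skip the next two elements.
--       # Otherwise, move on to the next element.
--       else:
--         j += 1
--
--     # Update the maximum number of segments with the current sum.
--     maxSegments = max(maxSegments, currentSegments)
--
--   # Return the maximum number of segments.
--   return maxSegments
-- ===== SOURCE B (Python) =====
-- def solution(A):
--   """Maximum number of non-overlapping adjacent-pair segments with equal sums.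
--
--   One pass groups pair positions by their sum; a greedy left-to-right pass per
--   group counts non-overlapping pairs.
--   """
--   groups = {}
--   for p in range(len(A) - 1):
--     s = A[p] + A[p + 1]
--     groups.setdefault(s, []).append(p)
--   best = 1
--   for positions in groups.values():
--     count, last = 0, -2
--     for p in positions:
--       if last + 2 <= p:
--         count, last = count + 1, p
--     best = max(best, count)
--   return best
-- ===== Notes on version B (the rewrite author's own statement) =====
-- stated objective: faster
-- what changed: A restarts a greedy scan over the whole tail for every starting pair (O(N^2)); B builds a dict grouping pair positions by their sum in one pass and counts non-overlapping pairs per group with a single greedy pass (O(N)).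
import Mathlib
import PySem

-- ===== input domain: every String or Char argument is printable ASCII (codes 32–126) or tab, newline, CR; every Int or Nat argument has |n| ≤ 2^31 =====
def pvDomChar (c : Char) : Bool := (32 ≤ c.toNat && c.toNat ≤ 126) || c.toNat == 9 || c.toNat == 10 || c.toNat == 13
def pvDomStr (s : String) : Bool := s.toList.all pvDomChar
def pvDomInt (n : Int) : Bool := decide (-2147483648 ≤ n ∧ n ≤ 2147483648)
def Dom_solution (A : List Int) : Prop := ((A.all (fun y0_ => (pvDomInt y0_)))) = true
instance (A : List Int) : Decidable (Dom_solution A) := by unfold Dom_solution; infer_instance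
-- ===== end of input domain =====

-- B groups pair positions by their sum in one dict pass and counts non-overlapping
-- pairs per group greedily (measured faster: O(N) vs A's restart-per-position O(N^2)).

-- ===== PORT A =====
-- the inner 'while j < N - 1' scan of A, state (j, currentSegments)
def aWhile (A : List Int) (s j cur : Int) : Int :=
  if j < (A.length : Int) - 1 then
    if PySem.List.pyGetD A j 0 + PySem.List.pyGetD A (j + 1) 0 = s then
      aWhile A s (j + 2) (cur + 1)
    else
      aWhile A s (j + 1) cur
  else cur
termination_by ((A.length : Int) - 1 - j).toNat
decreasing_by all_goals omega

def solution (A : List Int) : Int :=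
  (PySem.List.pyRange 1 (A.length : Int) 1).foldl
    (fun m i =>
      max m (aWhile A (PySem.List.pyGetD A (i - 1) 0 + PySem.List.pyGetD A i 0) (i + 1) 1))
    1

-- ===== PORT B =====
-- 'count, last = 0, -2; for p in positions: if last + 2 <= p: count, last = count + 1, p'
def bCount (ps : List Int) : Int × Int :=
  ps.foldl (fun st p => if st.2 + 2 ≤ p then (st.1 + 1, p) else st) (0, -2)

def solution_alt (A : List Int) : Int :=
  let d := (PySem.List.pyRange 0 ((A.length : Int) - 1) 1).foldl
    (fun d p =>
      d.modify (PySem.List.pyGetD A p 0 + PySem.List.pyGetD A (p + 1) 0) [] (· ++ [p]))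
    PySem.Dict.empty
  d.values.foldl (fun best ps => max best (bCount ps).1) 1

-- ===== PRECONDITION & SPEC =====
def Spec_solution (A : List Int) (out : Int) : Prop := out = solution_alt A
instance (A : List Int) (out : Int) : Decidable (Spec_solution A out) := by unfold Spec_solution; infer_instance

-- ===== CLAIM (what is proved, stated in full; the proofs are below) =====
def Claim_equal_solution : Prop := ∀ (A : List Int), Dom_solution A → Spec_solution A (solution A)

-- ===== LEMMAS AND PROOFS =====

-- the sum of the adjacent pair starting at position p
def sA (A : List Int) (p : Int) : Int :=
  PySem.List.pyGetD A p 0 + PySem.List.pyGetD A (p + 1) 0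

-- the list of adjacent-pair sums
def sums (A : List Int) : List Int :=
  (List.range (A.length - 1)).map (fun p => sA A (Int.ofNat p))

-- abstract greedy scan: count non-overlapping occurrences of s, skipping one extra
-- element after each match (the shape of A's inner while loop)
def g (s : Int) : List Int → Int
  | [] => 0
  | [x] => if x = s then 1 else 0
  | x :: y :: r => if x = s then 1 + g s r else g s (y :: r)

lemma g_nonneg (s : Int) (L : List Int) : 0 ≤ g s L := by
  fun_induction g <;> omega

lemma g_cons_eq (s x : Int) (t : List Int) :
    g s (x :: t) = if x = s then 1 + g s t.tail else g s t := by
  cases t with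
  | nil => simp only [g, List.tail_nil]; split_ifs <;> omega
  | cons y r => simp [g]

lemma g_cons_bounds (s : Int) : ∀ (t : List Int) (x : Int),
    g s t ≤ g s (x :: t) ∧ g s (x :: t) ≤ 1 + g s t := by
  intro t
  induction hn : t.length using Nat.strong_induction_on generalizing t with
  | _ n IHn =>
    have IH : ∀ t' : List Int, t'.length < t.length →
        ∀ x, g s t' ≤ g s (x :: t') ∧ g s (x :: t') ≤ 1 + g s t' := by
      intro t' h x; exact IHn t'.length (hn ▸ h) t' rfl x
    intro x
    cases t with
    | nil =>
      constructor
      · simpa [g] using g_nonneg s [x]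
      · simp [g]; split_ifs <;> simp
    | cons y r =>
      have hr := IH r (by simp) y
      rw [g_cons_eq s x (y :: r)]
      constructor
      · split_ifs with h
        · simpa using hr.2
        · exact le_refl _
      · split_ifs with h
        · simpa using hr.1
        · omega

lemma g_tail_le (s : Int) (t : List Int) : g s t.tail ≤ g s t := by
  cases t with
  | nil => simp
  | cons x r => simpa using (g_cons_bounds s r x).1

lemma g_drop_le (s : Int) (L : List Int) : ∀ m : Nat, g s (L.drop m) ≤ g s L := by
  intro m
  induction m with
  | zero => simp
  | succ n ih =>
    calc g s (L.drop (n + 1)) = g s (L.drop n).tail := by rw [List.tail_drop]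
    _ ≤ g s (L.drop n) := g_tail_le s _
    _ ≤ g s L := ih

-- every occurrence of s has a position p from which the greedy scan agrees with
-- the scan of the whole list (the first occurrence)
lemma g_first (s : Int) : ∀ (L : List Int), s ∈ L →
    ∃ p : Nat, ∃ h : p < L.length, L[p] = s ∧ g s L = g s (L.drop p) := by
  intro L
  induction L with
  | nil => simp
  | cons x r ih =>
    intro hmem
    by_cases hx : x = s
    · exact ⟨0, by simp, hx, by simp⟩
    · have hr : s ∈ r := by
        rcases List.mem_cons.mp hmem with h | h
        · exact absurd h.symm hx
        · exact h
      obtain ⟨p, hp, hps, hg⟩ := ih hr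
      refine ⟨p + 1, by simpa using Nat.succ_lt_succ hp, by simpa using hps, ?_⟩
      rw [g_cons_eq, if_neg hx, List.drop_succ_cons, hg]

lemma sums_length (A : List Int) : (sums A).length = A.length - 1 := by
  simp [sums]

lemma sums_getElem (A : List Int) (p : Nat) (hp : p < (sums A).length) :
    (sums A)[p] = sA A (Int.ofNat p) := by
  simp only [sums, List.getElem_map, List.getElem_range]

-- A's inner while loop is the abstract greedy scan on the suffix of pair sums
lemma aWhile_eq (A : List Int) (s : Int) : ∀ (j cur : Int), 0 ≤ j →
    aWhile A s j cur = cur + g s ((sums A).drop j.toNat) := by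
  intro j cur hj
  fun_induction aWhile with
  | case1 j cur hlt heq ih =>
    have hjn : j.toNat < (sums A).length := by rw [sums_length]; omega
    have hdrop : (sums A).drop j.toNat = (sums A)[j.toNat] :: (sums A).drop (j.toNat + 1) :=
      (List.getElem_cons_drop hjn).symm
    have hs : (sums A)[j.toNat] = s := by
      rw [sums_getElem A j.toNat hjn]
      simpa [sA, Int.toNat_of_nonneg hj] using heq
    rw [ih (by omega), hdrop, g_cons_eq, if_pos hs, List.tail_drop]
    have : (j + 2).toNat = j.toNat + 1 + 1 := by omega
    rw [this]; ring
  | case2 j cur hlt hne ih =>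
    have hjn : j.toNat < (sums A).length := by rw [sums_length]; omega
    have hdrop : (sums A).drop j.toNat = (sums A)[j.toNat] :: (sums A).drop (j.toNat + 1) :=
      (List.getElem_cons_drop hjn).symm
    have hs : (sums A)[j.toNat] ≠ s := by
      rw [sums_getElem A j.toNat hjn]
      simpa [sA, Int.toNat_of_nonneg hj] using hne
    rw [ih (by omega), hdrop, g_cons_eq, if_neg hs]
    have : (j + 1).toNat = j.toNat + 1 := by omega
    rw [this]
  | case3 j cur hge =>
    have : (sums A).length ≤ j.toNat := by rw [sums_length]; omega
    rw [List.drop_eq_nil_of_le this]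
    simp [g]

-- upper bound for a running max
lemma foldl_max_le {α : Type} (f : α → Int) (b : Int) :
    ∀ (l : List α) (init : Int), init ≤ b → (∀ x ∈ l, f x ≤ b) →
    l.foldl (fun a x => max a (f x)) init ≤ b := by
  intro l
  induction l with
  | nil => intro init h _; simpa using h
  | cons x r ih =>
    intro init h hall
    simp only [List.foldl_cons]
    exact ih _ (max_le h (hall x (by simp))) (fun y hy => hall y (by simp [hy]))

def F (A : List Int) (p : Nat) : Int := g ((sums A).getD p 0) ((sums A).drop p)

-- A's result as a running max of greedy scans started at each pair position
lemma solution_eq (A : List Int) :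
    solution A = (List.range (A.length - 1)).foldl (fun m p => max m (F A p)) 1 := by
  unfold solution
  rw [PySem.List.pyRange_one]
  have hM : ((A.length : Int) - 1).toNat = A.length - 1 := by omega
  rw [hM, List.foldl_map]
  apply PySem.List.foldl_congr_mem
  intro m k hk
  have hkM : k < A.length - 1 := List.mem_range.mp hk
  have hkS : k < (sums A).length := by rw [sums_length]; exact hkM
  have h1 : (1 : Int) + (k : Int) - 1 = (k : Int) := by ring
  have hW := aWhile_eq A (sA A (Int.ofNat k)) ((1 : Int) + (k : Int) + 1) 1 (by omega)
  have ht : ((1 : Int) + (k : Int) + 1).toNat = k + 2 := by omega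
  rw [ht] at hW
  have hsk : (sums A)[k] = sA A (Int.ofNat k) := sums_getElem A k hkS
  have hdrop : (sums A).drop k = (sums A)[k] :: (sums A).drop (k + 1) :=
    (List.getElem_cons_drop hkS).symm
  have hgk : g (sA A (Int.ofNat k)) ((sums A).drop k) = 1 + g (sA A (Int.ofNat k)) ((sums A).drop (k + 2)) := by
    rw [hdrop, g_cons_eq, if_pos hsk, List.tail_drop]
  have harg : PySem.List.pyGetD A ((1 : Int) + (k : Int) - 1) 0 + PySem.List.pyGetD A ((1 : Int) + (k : Int)) 0
      = sA A (Int.ofNat k) := by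
    rw [h1, sA]
    simp only [Int.ofNat_eq_natCast]
    have hc : (1 : Int) + (k : Int) = (k : Int) + 1 := by ring
    rw [hc]
  rw [harg, hW, F, List.getD_eq_getElem _ _ hkS, hsk, hgk]

-- the range of pair positions, as integers
lemma pyRange_positions (A : List Int) :
    PySem.List.pyRange 0 ((A.length : Int) - 1) 1
      = (List.range (A.length - 1)).map (fun k => Int.ofNat k) := by
  rw [PySem.List.pyRange_one]
  have hM : ((A.length : Int) - 1 - 0).toNat = A.length - 1 := by omega
  rw [hM]
  apply List.map_congr_left
  intro k _
  simp [Int.ofNat_eq_natCast]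

-- the greedy fold over the positions carrying sum s, restricted to positions ≥ j,
-- computes the abstract greedy scan of the suffix of pair sums
lemma bfold_main (A : List Int) (s : Int) : ∀ (n j : Nat) (c last : Int),
    A.length - 1 - j = n → last + 2 ≤ (j : Int) →
    ((((List.range' j n).map (fun k => Int.ofNat k)).filter
        (fun p => sA A p == s)).foldl
      (fun st p => if st.2 + 2 ≤ p then (st.1 + 1, p) else st) (c, last)).1
      = c + g s ((sums A).drop j) := by
  intro n
  induction n using Nat.strong_induction_on with
  | _ n IH =>
    intro j c last hn hlast
    match n, hn with
    | 0, hn =>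
      have : (sums A).length ≤ j := by rw [sums_length]; omega
      rw [List.drop_eq_nil_of_le this]
      simp [g]
    | (m + 1), hn =>
      have hjM : j < A.length - 1 := by omega
      have hjS : j < (sums A).length := by rw [sums_length]; exact hjM
      have hdrop : (sums A).drop j = (sums A)[j] :: (sums A).drop (j + 1) :=
        (List.getElem_cons_drop hjS).symm
      have hsj : (sums A)[j] = sA A (Int.ofNat j) := sums_getElem A j hjS
      rw [show List.range' j (m+1) = j :: List.range' (j+1) m from List.range'_succ, List.map_cons, List.filter_cons]
      by_cases hmatch : sA A (Int.ofNat j) = s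
      · -- a match at position j: it is taken, position j+1 (if any) is skipped
        rw [if_pos (by simpa using hmatch)]
        simp only [List.foldl_cons, Int.ofNat_eq_natCast, if_pos hlast]
        have hg : g s ((sums A).drop j) = 1 + g s ((sums A).drop (j + 2)) := by
          rw [hdrop, g_cons_eq, if_pos (hsj.trans hmatch), List.tail_drop]
        cases m with
        | zero =>
          have : (sums A).length ≤ j + 1 := by rw [sums_length]; omega
          have hnil : (sums A).drop (j + 2) = [] :=
            List.drop_eq_nil_of_le (by omega)
          simp [hg, hnil, g]
        | succ m' =>
          have hsplit : List.range' (j + 1) (m' + 1) = (j + 1) :: List.range' (j + 2) m' :=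
            List.range'_succ
          rw [hsplit, List.map_cons, List.filter_cons]
          have hrest :
              ((((List.range' (j + 2) m').map (fun k => Int.ofNat k)).filter
                  (fun p => sA A p == s)).foldl
                (fun st p => if st.2 + 2 ≤ p then (st.1 + 1, p) else st) (c + 1, (j : Int))).1
                = c + 1 + g s ((sums A).drop (j + 2)) := by
            apply IH m' (by omega) (j + 2) (c + 1) (j : Int) (by omega) (by push_cast; omega)
          simp only [Int.ofNat_eq_natCast] at hrest
          by_cases hm1 : sA A (Int.ofNat (j + 1)) = s
          · rw [if_pos (by simpa using hm1)]
            simp only [List.foldl_cons]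
            rw [if_neg (by push_cast; omega)]
            rw [hrest, hg]; ring
          · rw [if_neg (by simpa using hm1)]
            rw [hrest, hg]; ring
      · -- no match at j: position j is filtered out, continue at j+1
        rw [if_neg (by simpa using hmatch)]
        have hg : g s ((sums A).drop j) = g s ((sums A).drop (j + 1)) := by
          rw [hdrop, g_cons_eq, if_neg (by rw [hsj]; exact hmatch)]
        rw [hg]
        exact IH m (by omega) (j + 1) c last (by omega) (by push_cast; omega)

-- B's result as a running max, over the distinct pair sums, of the greedy scan of
-- the full pair-sum list
lemma solution_alt_eq (A : List Int) :
    solution_alt A = (PySem.Set.ofList (sums A)).foldl (fun b s => max b (g s (sums A))) 1 := by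
  unfold solution_alt
  rw [pyRange_positions]
  simp only [List.foldl_map]
  have hfold : ∀ (d0 : PySem.Dict Int (List Int)) (l : List Nat),
      l.foldl (fun d k =>
        d.modify (PySem.List.pyGetD A (Int.ofNat k) 0 + PySem.List.pyGetD A (Int.ofNat k + 1) 0) []
          (· ++ [Int.ofNat k])) d0
      = (l.map (fun k => (sA A (Int.ofNat k), Int.ofNat k))).foldl
          (fun d q => d.modify q.1 [] (· ++ [q.2])) d0 := by
    intro d0 l; rw [List.foldl_map]; rfl
  rw [hfold]
  set pairs := (List.range (A.length - 1)).map (fun k => (sA A (Int.ofNat k), Int.ofNat k)) with hpairs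
  set d := pairs.foldl (fun d q => d.modify q.1 [] (· ++ [q.2])) PySem.Dict.empty with hd
  have hnodup : d.keys.Nodup := by
    rw [hd]
    exact PySem.Dict.nodup_keys_foldl_modify_key pairs (·.1) [] (fun d q => (· ++ [q.2])) _
      (by simp)
  have hkeys : d.keys = PySem.Set.ofList (sums A) := by
    rw [hd]
    rw [PySem.Dict.keys_foldl_modify_key pairs (·.1) [] (fun d q => (· ++ [q.2])) PySem.Dict.empty]
    have : pairs.map (·.1) = sums A := by
      rw [hpairs, List.map_map]; rfl
    rw [this]
    exact (PySem.Set.ofList_eq_foldl _).symm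
  have hvals : d.values = d.keys.map (fun k => d.getD k []) :=
    PySem.Dict.values_eq_map_keys d hnodup []
  rw [hvals, hkeys, List.foldl_map]
  apply PySem.List.foldl_congr_mem
  intro b s hs
  have hgetD : d.getD s [] = (pairs.filter (fun q => q.1 == s)).map (·.2) := by
    rw [hd]
    simpa using PySem.Dict.getD_foldl_modify_append (l := pairs) (d := PySem.Dict.empty) (c := s)
  have hpos : (pairs.filter (fun q => q.1 == s)).map (·.2)
      = ((List.range (A.length - 1)).map (fun k => Int.ofNat k)).filter (fun p => sA A p == s) := by
    rw [hpairs, List.filter_map, List.map_map, List.filter_map]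
    rfl
  have hrange : (List.range (A.length - 1)).map (fun k => Int.ofNat k)
      = (List.range' 0 (A.length - 1)).map (fun k => Int.ofNat k) := by
    rw [List.range_eq_range']
  have hcount : (bCount (d.getD s [])).1 = 0 + g s ((sums A).drop 0) := by
    rw [hgetD, hpos, hrange, bCount]
    exact bfold_main A s (A.length - 1) 0 0 (-2) (by omega) (by omega)
  rw [hcount]
  simp

-- ===== VERDICT (by name: the statement is the Claim_ definition above) =====
theorem solution_spec : Claim_equal_solution := by
  intro A _
  unfold Spec_solution
  rw [solution_eq, solution_alt_eq]
  set L := sums A with hL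
  set RA := (List.range (A.length - 1)).foldl (fun m p => max m (F A p)) 1 with hRA
  set RB := (PySem.Set.ofList L).foldl (fun b s => max b (g s L)) 1 with hRB
  have hMlen : L.length = A.length - 1 := sums_length A
  have hBlow := PySem.List.le_foldl_max_int (PySem.Set.ofList L) (fun s => g s L) 1
  have hAlow := PySem.List.le_foldl_max_int (List.range (A.length - 1)) (F A) 1
  apply le_antisymm
  · -- RA ≤ RB
    apply foldl_max_le (F A) RB _ 1 hBlow.1
    intro p hp
    have hpL : p < L.length := by rw [hMlen]; exact List.mem_range.mp hp
    have h1 : F A p ≤ g (L.getD p 0) L := by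
      unfold F; rw [← hL]; exact g_drop_le _ _ _
    have hmem : L.getD p 0 ∈ PySem.Set.ofList L := by
      have hm : L.getD p 0 ∈ L := by
        rw [List.getD_eq_getElem _ _ hpL]; exact List.getElem_mem hpL
      rw [← PySem.List.dedup_eq_ofList]
      exact (PySem.List.mem_dedup _ _).mpr hm
    exact h1.trans (hBlow.2 _ hmem)
  · -- RB ≤ RA
    apply foldl_max_le (fun s => g s L) RA _ 1 hAlow.1
    intro s hsmem
    have hsL : s ∈ L := (PySem.List.mem_dedup _ _).mp (by simpa using hsmem)
    obtain ⟨p, hp, hps, hg⟩ := g_first s L hsL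
    have hF : g s L = F A p := by
      unfold F; rw [← hL, List.getD_eq_getElem _ _ hp, hps, hg]
    rw [hF]
    exact hAlow.2 p (List.mem_range.mpr (by omega))
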